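-- pv_equiv track=rewrite | github.com/lmr3796/KeyMap-Server | src/server.py | key_word_group
-- ===== SOURCE A (Python) =====
-- def key_word_group(kw_list):
--     limit = (4, 8, 16)
--     result = [[],[],[]]
--     for kw in kw_list:
--         for i in range(0, len(limit)):
--             if len(result[i]) < limit[i]:
--                 result[i].append(kw)
--                 break
--     return result
-- ===== SOURCE B (Python) =====
-- def key_word_group(kw_list):
--     lst = list(kw_list)
--     return [lst[:4], lst[4:12], lst[12:28]]
-- ===== Notes on version B (the rewrite author's own statement) =====
-- stated objective: simpler
-- what changed: Replaces the nested greedy fill-and-break loop with direct slice-based partitioning at the cumulative limit boundaries 4, 12, 28.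
import Mathlib
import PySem

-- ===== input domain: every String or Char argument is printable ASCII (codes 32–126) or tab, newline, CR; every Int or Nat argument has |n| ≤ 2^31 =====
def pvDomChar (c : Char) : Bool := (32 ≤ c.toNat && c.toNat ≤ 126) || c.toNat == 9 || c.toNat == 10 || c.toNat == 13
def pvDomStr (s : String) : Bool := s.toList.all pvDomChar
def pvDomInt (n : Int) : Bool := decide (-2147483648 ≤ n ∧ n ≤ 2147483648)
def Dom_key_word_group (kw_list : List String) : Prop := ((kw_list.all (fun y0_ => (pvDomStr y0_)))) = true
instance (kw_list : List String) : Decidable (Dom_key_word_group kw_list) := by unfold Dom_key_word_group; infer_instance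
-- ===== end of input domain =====

-- B replaces A's nested greedy fill-and-break loop with slice-based partitioning
-- at the cumulative boundaries 4, 12, 28 (objective: simpler).


-- ===== PORT A =====
-- A's inner 'for i in range(0, 3): if len(result[i]) < limit[i]: append; break'
-- is transliterated with the three fixed iterations written out (the break makes
-- the iterations mutually exclusive if-else branches).
def key_word_group_loop (r0 r1 r2 : List String) : List String → List String × List String × List String
  | [] => (r0, r1, r2)
  | kw :: rest =>
      if r0.length < 4 then key_word_group_loop (r0 ++ [kw]) r1 r2 rest
      else if r1.length < 8 then key_word_group_loop r0 (r1 ++ [kw]) r2 rest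
      else if r2.length < 16 then key_word_group_loop r0 r1 (r2 ++ [kw]) rest
      else key_word_group_loop r0 r1 r2 rest

def key_word_group (kw_list : List String) : List (List String) :=
  let r := key_word_group_loop [] [] [] kw_list
  [r.1, r.2.1, r.2.2]

-- ===== PORT B =====
def key_word_group_alt (kw_list : List String) : List (List String) :=
  let lst := kw_list
  [PySem.List.slice lst none (some 4),
   PySem.List.slice lst (some 4) (some 12),
   PySem.List.slice lst (some 12) (some 28)]

-- ===== PRECONDITION & SPEC =====
def Spec_key_word_group (kw_list : List String) (out : List (List String)) : Prop := out = key_word_group_alt kw_list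
instance (kw_list : List String) (out : List (List String)) : Decidable (Spec_key_word_group kw_list out) := by unfold Spec_key_word_group; infer_instance

-- ===== CLAIM (what is proved, stated in full; the proofs are below) =====
def Claim_equal_key_word_group : Prop := ∀ (kw_list : List String), Dom_key_word_group kw_list → Spec_key_word_group kw_list (key_word_group kw_list)

-- ===== LEMMAS AND PROOFS =====

-- Invariant of A's loop: with partially filled groups, the loop tops each group
-- up from the remaining input in order.
theorem key_word_group_loop_eq (kws : List String) :
    ∀ (r0 r1 r2 : List String), r0.length ≤ 4 → r1.length ≤ 8 → r2.length ≤ 16 →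
    key_word_group_loop r0 r1 r2 kws =
      (r0 ++ kws.take (4 - r0.length),
       r1 ++ ((kws.drop (4 - r0.length)).take (8 - r1.length)),
       r2 ++ (((kws.drop (4 - r0.length)).drop (8 - r1.length)).take (16 - r2.length))) := by
  induction kws with
  | nil => intro r0 r1 r2 _ _ _; simp [key_word_group_loop]
  | cons kw rest ih =>
    intro r0 r1 r2 h0 h1 h2
    by_cases c0 : r0.length < 4
    · rw [key_word_group_loop, if_pos c0, ih (r0 ++ [kw]) r1 r2 (by simp; omega) h1 h2]
      have : 4 - r0.length = (4 - (r0 ++ [kw]).length) + 1 := by simp; omega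
      simp [this, List.take_succ_cons]
    · have e0 : 4 - r0.length = 0 := by omega
      by_cases c1 : r1.length < 8
      · rw [key_word_group_loop, if_neg c0, if_pos c1, ih r0 (r1 ++ [kw]) r2 h0 (by simp; omega) h2]
        have : 8 - r1.length = (8 - (r1 ++ [kw]).length) + 1 := by simp; omega
        simp [e0, this, List.take_succ_cons]
      · have e1 : 8 - r1.length = 0 := by omega
        by_cases c2 : r2.length < 16
        · rw [key_word_group_loop, if_neg c0, if_neg c1, if_pos c2,
              ih r0 r1 (r2 ++ [kw]) h0 h1 (by simp; omega)]
          have : 16 - r2.length = (16 - (r2 ++ [kw]).length) + 1 := by simp; omega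
          simp [e0, e1, this, List.take_succ_cons]
        · have e2 : 16 - r2.length = 0 := by omega
          rw [key_word_group_loop, if_neg c0, if_neg c1, if_neg c2, ih r0 r1 r2 h0 h1 h2]
          simp [e0, e1, e2]

-- ===== VERDICT (by name: the statement is the Claim_ definition above) =====
theorem key_word_group_spec : Claim_equal_key_word_group := by
  intro kw_list _
  unfold Spec_key_word_group key_word_group key_word_group_alt
  rw [key_word_group_loop_eq kw_list [] [] [] (by simp) (by simp) (by simp)]
  simp only [show ((4:Int)) = ((4:Nat):Int) by norm_num, show ((12:Int)) = ((12:Nat):Int) by norm_num,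
    show ((28:Int)) = ((28:Nat):Int) by norm_num,
    PySem.List.slice_to_natCast, PySem.List.slice_natCast]
  simp [List.drop_drop]
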